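-- pv_equiv track=rewrite | github.com/AntonNestsiarenka/ProjectEuler | euler_project.py | delta_sum_of_squares_and_square_of_sum
-- ===== SOURCE A (Python) =====
-- def delta_sum_of_squares_and_square_of_sum(limit):
--     """
--        Разность между суммой квадратов и квадратом суммы.
--        The difference between the sum of the squares and the square of the sum.
--     """
--     sum_of_squares = 0
--     square_of_sum = 0
--     for i in range(1, limit + 1):
--         sum_of_squares += i ** 2
--         square_of_sum += i
--     square_of_sum = square_of_sum ** 2
--     return abs(sum_of_squares - square_of_sum)
-- ===== SOURCE B (Python) =====
-- def delta_sum_of_squares_and_square_of_sum(limit):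
--     """Closed-form O(1): Gauss formulas for sum and sum of squares."""
--     n = limit if limit > 0 else 0
--     s = n * (n + 1) // 2
--     sq = n * (n + 1) * (2 * n + 1) // 6
--     return s * s - sq
-- ===== Notes on version B (the rewrite author's own statement) =====
-- stated objective: faster
-- what changed: Replaced the O(n) accumulation loop by the closed-form Gauss formulas n(n+1)/2 and n(n+1)(2n+1)/6 (square of sum always dominates, so abs is unneeded).
import Mathlib
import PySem

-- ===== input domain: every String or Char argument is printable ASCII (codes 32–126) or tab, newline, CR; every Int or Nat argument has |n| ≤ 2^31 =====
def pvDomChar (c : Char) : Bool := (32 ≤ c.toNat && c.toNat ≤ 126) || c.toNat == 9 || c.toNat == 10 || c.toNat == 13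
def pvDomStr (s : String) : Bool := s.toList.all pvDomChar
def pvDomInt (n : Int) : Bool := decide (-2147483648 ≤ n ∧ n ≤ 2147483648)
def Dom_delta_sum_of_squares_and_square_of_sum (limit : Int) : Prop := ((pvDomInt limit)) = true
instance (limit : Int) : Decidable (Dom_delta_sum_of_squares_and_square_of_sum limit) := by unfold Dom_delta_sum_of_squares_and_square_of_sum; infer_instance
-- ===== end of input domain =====

-- B replaces A's accumulation loop by the closed-form Gauss formulas (objective: faster).

-- ===== PORT A =====
def delta_sum_of_squares_and_square_of_sum (limit : Int) : Int :=
  let st := (PySem.List.pyRange 1 (limit + 1) 1).foldl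
    (fun (acc : Int × Int) i => (acc.1 + i ^ 2, acc.2 + i)) (0, 0)
  let sum_of_squares := st.1
  let square_of_sum := st.2 ^ 2
  |sum_of_squares - square_of_sum|

-- ===== PORT B =====
def delta_sum_of_squares_and_square_of_sum_alt (limit : Int) : Int :=
  let n : Int := if limit > 0 then limit else 0
  let s := PySem.Int.floordiv (n * (n + 1)) 2
  let sq := PySem.Int.floordiv (n * (n + 1) * (2 * n + 1)) 6
  s * s - sq

-- ===== PRECONDITION & SPEC =====
def Spec_delta_sum_of_squares_and_square_of_sum (limit : Int) (out : Int) : Prop := out = delta_sum_of_squares_and_square_of_sum_alt limit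
instance (limit : Int) (out : Int) : Decidable (Spec_delta_sum_of_squares_and_square_of_sum limit out) := by unfold Spec_delta_sum_of_squares_and_square_of_sum; infer_instance

-- ===== CLAIM (what is proved, stated in full; the proofs are below) =====
def Claim_equal_delta_sum_of_squares_and_square_of_sum : Prop := ∀ (limit : Int), Dom_delta_sum_of_squares_and_square_of_sum limit → Spec_delta_sum_of_squares_and_square_of_sum limit (delta_sum_of_squares_and_square_of_sum limit)

-- ===== LEMMAS AND PROOFS =====

theorem pvDvd2 (n : Nat) : (2 : Int) ∣ (n : Int) * ((n : Int) + 1) :=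
  (Int.even_mul_succ_self (n : Int)).two_dvd

theorem pvDvd6 (n : Nat) : (6 : Int) ∣ (n : Int) * ((n : Int) + 1) * (2 * (n : Int) + 1) := by
  induction n with
  | zero => simp
  | succ m ih =>
      obtain ⟨k, hk⟩ := ih
      refine ⟨k + ((m : Int) + 1) ^ 2, ?_⟩
      push_cast
      linear_combination hk

-- The loop's fold over range(1, n+1), started from an arbitrary accumulator.
theorem pvFold_closed (n : Nat) (a b : Int) :
    (PySem.List.pyRange 1 ((n : Int) + 1) 1).foldl
      (fun (acc : Int × Int) i => (acc.1 + i ^ 2, acc.2 + i)) (a, b)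
    = (a + ((n : Int) * (n + 1) * (2 * n + 1)) / 6, b + ((n : Int) * (n + 1)) / 2) := by
  induction n generalizing a b with
  | zero => simp [PySem.List.pyRange_one_eq_nil]
  | succ m ih =>
      rw [show ((m + 1 : Nat) : Int) + 1 = ((m : Int) + 1) + 1 by push_cast; ring,
        PySem.List.pyRange_one_succ_right (by omega), List.foldl_append, ih]
      simp only [List.foldl_cons, List.foldl_nil]
      obtain ⟨k, hk⟩ := pvDvd6 m
      obtain ⟨j, hj⟩ := pvDvd2 m
      have hH6 : ((m + 1 : Nat) : Int) * ((m + 1 : Nat) + 1) * (2 * (m + 1 : Nat) + 1)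
          = 6 * (k + ((m : Int) + 1) ^ 2) := by push_cast; linear_combination hk
      have h2 : ((m + 1 : Nat) : Int) * ((m + 1 : Nat) + 1) = 2 * (j + ((m : Int) + 1)) := by
        push_cast; linear_combination hj
      have e6 : ((m + 1 : Nat) : Int) * (((m : Int) + 1) + 1) * (2 * ((m + 1 : Nat) : Int) + 1) / 6
          = k + ((m : Int) + 1) ^ 2 := by
        rw [show ((m + 1 : Nat) : Int) * (((m : Int) + 1) + 1) * (2 * ((m + 1 : Nat) : Int) + 1)
            = 6 * (k + ((m : Int) + 1) ^ 2) by push_cast; linear_combination hk]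
        exact Int.mul_ediv_cancel_left _ (by norm_num)
      have e2 : ((m + 1 : Nat) : Int) * (((m : Int) + 1) + 1) / 2 = j + ((m : Int) + 1) := by
        rw [show ((m + 1 : Nat) : Int) * (((m : Int) + 1) + 1) = 2 * (j + ((m : Int) + 1)) by
          push_cast; linear_combination hj]
        exact Int.mul_ediv_cancel_left _ (by norm_num)
      rw [hk, hj, Int.mul_ediv_cancel_left _ (by norm_num : (6:Int) ≠ 0),
        Int.mul_ediv_cancel_left _ (by norm_num : (2:Int) ≠ 0), e6, e2]
      simp [add_assoc]

theorem pv_spec_aux (limit : Int) :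
    delta_sum_of_squares_and_square_of_sum limit = delta_sum_of_squares_and_square_of_sum_alt limit := by
  unfold delta_sum_of_squares_and_square_of_sum delta_sum_of_squares_and_square_of_sum_alt
  by_cases h : limit > 0
  · have hn : limit = ((limit.toNat : Nat) : Int) := (Int.toNat_of_nonneg (le_of_lt h)).symm
    rw [hn, pvFold_closed limit.toNat 0 0]
    simp only [if_pos (hn ▸ h),
      PySem.Int.floordiv_eq_ediv_of_pos (by norm_num : (0:Int) < 2),
      PySem.Int.floordiv_eq_ediv_of_pos (by norm_num : (0:Int) < 6)]
    set n : Int := ((limit.toNat : Nat) : Int) with hdef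
    obtain ⟨k, hk⟩ := pvDvd6 limit.toNat
    obtain ⟨j, hj⟩ := pvDvd2 limit.toNat
    rw [← hdef] at hk hj
    rw [hk, hj, Int.mul_ediv_cancel_left _ (by norm_num : (6:Int) ≠ 0),
      Int.mul_ediv_cancel_left _ (by norm_num : (2:Int) ≠ 0)]
    have hn0 : 0 ≤ n := by positivity
    have h36k : 36 * k = 6 * (n * (n + 1)) * (2 * n + 1) := by linear_combination -6 * hk
    have h36j : 36 * j ^ 2 = 9 * (n * (n + 1)) ^ 2 := by
      linear_combination (-9 * (n * (n + 1) + 2 * j)) * hj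
    have hfact : 9 * (n * (n + 1)) ^ 2 - 6 * (n * (n + 1)) * (2 * n + 1)
        = 3 * (n * (n + 1)) * ((3 * n + 2) * (n - 1)) := by ring
    have hle : k ≤ j ^ 2 := by
      by_cases h1n : 1 ≤ n
      · have : 0 ≤ 3 * (n * (n + 1)) * ((3 * n + 2) * (n - 1)) := by
          apply mul_nonneg (by nlinarith) (by nlinarith)
        linarith
      · have hz : n = 0 := by omega
        rw [hz] at hk hj; simp at hk hj; nlinarith [sq_nonneg j]
    simp only [zero_add]
    rw [abs_of_nonpos (by nlinarith)]
    ring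
  · rw [PySem.List.pyRange_one_eq_nil (by omega)]
    simp [if_neg h, PySem.Int.floordiv]

-- ===== VERDICT (by name: the statement is the Claim_ definition above) =====
theorem delta_sum_of_squares_and_square_of_sum_spec : Claim_equal_delta_sum_of_squares_and_square_of_sum := by
  intro limit _
  exact pv_spec_aux limit
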